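-- pv_equiv track=rewrite | github.com/Mateuszpietrusinski/publish-docs-action | publish_docs.py | merge_additional_applications
-- ===== SOURCE A (Python) =====
-- def merge_additional_applications(current, to_merge):
--     merged = []
--     new_item = True
--
--     for additional_app in current:
--         if additional_app['name'] == to_merge['name']:
--             additional_app = to_merge
--             new_item = False
--
--         merged.append(additional_app)
--
--     if new_item == True:
--         merged.append(to_merge)
--
--     return merged
-- ===== SOURCE B (Python) =====
-- def _replace(current, to_merge):
--     """Recursively replace every dict whose 'name' equals to_merge's by to_merge.
--     Returns the rebuilt list, or None if no element matched."""
--     if not current: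
--         return None
--     head, tail = current[0], current[1:]
--     rest = _replace(tail, to_merge)
--     if head['name'] == to_merge['name']:
--         return [to_merge] + (tail if rest is None else rest)
--     return None if rest is None else [head] + rest
--
-- def merge_additional_applications(current, to_merge):
--     replaced = _replace(current, to_merge)
--     return list(current) + [to_merge] if replaced is None else replaced
-- ===== Notes on version B (the rewrite author's own statement) =====
-- stated objective: alternative
-- what changed: A's single imperative pass with a mutable new_item flag is replaced by a recursive Option-returning replacer: the recursion rebuilds the list back-to-front returning None when nothing matched, and the top level appends to_merge exactly in the None case.
import Mathlib
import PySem

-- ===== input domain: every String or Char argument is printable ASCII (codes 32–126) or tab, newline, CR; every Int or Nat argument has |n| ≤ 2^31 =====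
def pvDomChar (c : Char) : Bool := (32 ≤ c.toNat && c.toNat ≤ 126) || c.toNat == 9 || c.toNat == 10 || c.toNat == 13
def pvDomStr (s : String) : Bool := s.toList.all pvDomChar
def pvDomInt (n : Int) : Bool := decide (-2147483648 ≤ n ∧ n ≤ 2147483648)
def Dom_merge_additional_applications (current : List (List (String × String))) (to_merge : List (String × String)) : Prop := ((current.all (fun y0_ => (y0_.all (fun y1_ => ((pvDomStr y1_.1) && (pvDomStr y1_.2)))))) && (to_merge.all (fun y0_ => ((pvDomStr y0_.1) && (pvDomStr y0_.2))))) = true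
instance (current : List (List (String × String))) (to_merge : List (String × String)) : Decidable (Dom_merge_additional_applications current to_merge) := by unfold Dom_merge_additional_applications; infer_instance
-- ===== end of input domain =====

-- B replaces A's one-pass loop with a mutable flag by a recursive Option-returning replacer
-- (none = no match, caller appends); return-value equivalence on inputs where no KeyError occurs.

-- ===== PORT A =====
-- d['name']: first match in the association list (Python dict lookup)
def pvName (d : List (String × String)) : Option String := PySem.Dict.get? ⟨d⟩ "name"

def merge_additional_applications (current : List (List (String × String))) (to_merge : List (String × String)) : List (List (String × String)) :=
  -- loop: state (merged, new_item)
  let st := current.foldl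
    (fun (st : List (List (String × String)) × Bool) additional_app =>
      if pvName additional_app = pvName to_merge then (st.1 ++ [to_merge], false)
      else (st.1 ++ [additional_app], st.2))
    ([], true)
  if st.2 = true then st.1 ++ [to_merge] else st.1

-- ===== PORT B =====
-- _replace: rebuilds the list with matches replaced, or none if no element matched
def pvReplace (to_merge : List (String × String)) : List (List (String × String)) → Option (List (List (String × String)))
  | [] => none
  | head :: tail =>
    let rest := pvReplace to_merge tail
    if pvName head = pvName to_merge then
      some (to_merge :: (match rest with | none => tail | some r => r))
    else
      match rest with | none => none | some r => some (head :: r)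

def merge_additional_applications_alt (current : List (List (String × String))) (to_merge : List (String × String)) : List (List (String × String)) :=
  match pvReplace to_merge current with
  | none => current ++ [to_merge]
  | some r => r

-- ===== PRECONDITION & SPEC =====
-- Pre_ excludes exactly the inputs where Python raises KeyError: an element of current lacks the
-- 'name' key, or current is nonempty and to_merge lacks it (with empty current, to_merge['name'] is never evaluated).
def Pre_merge_additional_applications (current : List (List (String × String))) (to_merge : List (String × String)) : Prop :=
  (current ≠ [] → (pvName to_merge).isSome) ∧ ∀ x ∈ current, (pvName x).isSome
instance (current : List (List (String × String))) (to_merge : List (String × String)) : Decidable (Pre_merge_additional_applications current to_merge) := by unfold Pre_merge_additional_applications; infer_instance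

def pvWitness_merge_additional_applications : (List (List (String × String))) × (List (String × String)) :=
  ([[("name", "a"), ("v", "1")], [("name", "b")]], [("name", "a"), ("v", "9")])

def Spec_merge_additional_applications (current : List (List (String × String))) (to_merge : List (String × String)) (out : List (List (String × String))) : Prop := out = merge_additional_applications_alt current to_merge
instance (current : List (List (String × String))) (to_merge : List (String × String)) (out : List (List (String × String))) : Decidable (Spec_merge_additional_applications current to_merge out) := by unfold Spec_merge_additional_applications; infer_instance

-- ===== CLAIM (what is proved, stated in full; the proofs are below) =====
def Claim_equal_merge_additional_applications : Prop := ∀ (current : List (List (String × String))) (to_merge : List (String × String)), Dom_merge_additional_applications current to_merge → Pre_merge_additional_applications current to_merge → Spec_merge_additional_applications current to_merge (merge_additional_applications current to_merge)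

-- ===== LEMMAS AND PROOFS =====
-- loop invariant for A's foldl: accumulator = acc ++ replaced map, flag = b && no match so far
theorem merge_foldl_char (to_merge : List (String × String)) (xs : List (List (String × String)))
    (acc : List (List (String × String))) (b : Bool) :
    xs.foldl
      (fun (st : List (List (String × String)) × Bool) additional_app =>
        if pvName additional_app = pvName to_merge then (st.1 ++ [to_merge], false)
        else (st.1 ++ [additional_app], st.2))
      (acc, b)
    = (acc ++ xs.map (fun x => if pvName x = pvName to_merge then to_merge else x),
       b && !(xs.any (fun x => pvName x = pvName to_merge))) := by
  induction xs generalizing acc b with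
  | nil => simp
  | cons y ys ih =>
    simp only [List.foldl_cons, List.map_cons, List.any_cons]
    by_cases h : pvName y = pvName to_merge
    · simp [h, ih]
    · simp [h, ih, List.append_assoc]

-- when no element matches, the replacing map is the identity
theorem map_id_of_no_match (to_merge : List (String × String)) (xs : List (List (String × String)))
    (h : ¬ xs.any (fun x => pvName x = pvName to_merge) = true) :
    xs.map (fun x => if pvName x = pvName to_merge then to_merge else x) = xs := by
  induction xs with
  | nil => rfl
  | cons z zs ihz =>
    simp only [List.any_cons, Bool.or_eq_true, not_or, decide_eq_true_eq] at h
    rw [List.map_cons, if_neg h.1, ihz (by simpa using h.2)]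

-- characterisation of B's recursive replacer
theorem pvReplace_char (to_merge : List (String × String)) (xs : List (List (String × String))) :
    pvReplace to_merge xs
    = if xs.any (fun x => pvName x = pvName to_merge)
      then some (xs.map (fun x => if pvName x = pvName to_merge then to_merge else x))
      else none := by
  induction xs with
  | nil => simp [pvReplace]
  | cons y ys ih =>
    simp only [pvReplace, List.any_cons, List.map_cons]
    by_cases h : pvName y = pvName to_merge
    · rw [ih]
      by_cases h2 : ys.any (fun x => pvName x = pvName to_merge)
      · simp [h, h2]
      · simp [h, h2, map_id_of_no_match to_merge ys (by simp [h2])]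
    · rw [ih]
      by_cases h2 : ys.any (fun x => pvName x = pvName to_merge)
      · simp [h, h2]
      · simp [h, h2]

-- ===== VERDICT (by name: the statement is the Claim_ definition above) =====
theorem merge_additional_applications_spec : Claim_equal_merge_additional_applications := by
  intro current to_merge _ _
  unfold Spec_merge_additional_applications merge_additional_applications merge_additional_applications_alt
  rw [merge_foldl_char, pvReplace_char]
  by_cases h : current.any (fun x => pvName x = pvName to_merge)
  · simp [h]
  · simp [h, map_id_of_no_match to_merge current (by simp [h])]
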